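-- pv_equiv track=rewrite | github.com/MugeshRao27/cloudmalscan-backend | app/routes/scan.py | detect_family_from_strings
-- ===== SOURCE A (Python) =====
-- def detect_family_from_strings(suspicious, file_ext):
--     s = [x.lower() for x in suspicious]
--
--     ransomware_keys = ["base64", "encrypt", "payload", "ransom", "bitcoin"]
--     trojan_keys     = ["mimikatz", "metasploit", "meterpreter", "backdoor"]
--     botnet_keys     = ["nc -e", "wget", "curl", "botnet"]
--     spyware_keys    = ["keylog", "screenshot", "password", "credential"]
--     rootkit_keys    = ["rootkit", "stealth", "hide", "hook"]
--     worm_keys       = ["/bin/sh", "spread", "replicate", "worm"]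
--
--     scores = {
--         "Ransomware": sum(1 for k in ransomware_keys if any(k in x for x in s)),
--         "Trojan":     sum(1 for k in trojan_keys     if any(k in x for x in s)),
--         "Botnet":     sum(1 for k in botnet_keys     if any(k in x for x in s)),
--         "Spyware":    sum(1 for k in spyware_keys    if any(k in x for x in s)),
--         "Rootkit":    sum(1 for k in rootkit_keys    if any(k in x for x in s)),
--         "Worm":       sum(1 for k in worm_keys       if any(k in x for x in s)),
--     }
--
--     if file_ext in [".exe", ".dll"]:
--         scores["Trojan"] += 2
--
--     best  = max(scores, key=scores.get)
--     score = scores[best]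
--     return best if score > 0 else "Trojan"
-- ===== SOURCE B (Python) =====
-- _KEYWORD_FAMILY = [
--     ("base64", 0), ("encrypt", 0), ("payload", 0), ("ransom", 0), ("bitcoin", 0),
--     ("mimikatz", 1), ("metasploit", 1), ("meterpreter", 1), ("backdoor", 1),
--     ("nc -e", 2), ("wget", 2), ("curl", 2), ("botnet", 2),
--     ("keylog", 3), ("screenshot", 3), ("password", 3), ("credential", 3),
--     ("rootkit", 4), ("stealth", 4), ("hide", 4), ("hook", 4),
--     ("/bin/sh", 5), ("spread", 5), ("replicate", 5), ("worm", 5),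
-- ]
-- _FAMILY_NAMES = ["Ransomware", "Trojan", "Botnet", "Spyware", "Rootkit", "Worm"]
--
-- def detect_family_from_strings(suspicious, file_ext):
--     # Streaming scan: each keyword is tested only until its first hit, then retired
--     # from the work-list; its family's counter is bumped at the moment of discovery.
--     counts = [0, 0, 0, 0, 0, 0]
--     remaining = list(_KEYWORD_FAMILY)
--     for x in suspicious:
--         if not remaining:
--             break
--         lx = x.lower()
--         keep = []
--         for k, f in remaining:
--             if k in lx:
--                 counts[f] += 1
--             else:
--                 keep.append((k, f))
--         remaining = keep
--     if file_ext in (".exe", ".dll"):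
--         counts[1] += 2
--     best = (1, 0)  # Trojan at score 0 is the fallback
--     for p in enumerate(counts):
--         if p[1] > best[1]:
--             best = p
--     return _FAMILY_NAMES[best[0]]
-- ===== Notes on version B (the rewrite author's own statement) =====
-- stated objective: alternative
-- what changed: A makes 25 independent any() passes over the string list (one per keyword) and builds a dict for max(key=scores.get); B makes ONE streaming pass over the strings carrying a shrinking work-list of (keyword, family) pairs - a keyword is tested only until its first hit, then retired and its family's counter bumped at that moment (with early exit once all keywords are found) - followed by an enumerate-argmax over the six counters with the Trojan bonus applied to counts[1].
import Mathlib
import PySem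

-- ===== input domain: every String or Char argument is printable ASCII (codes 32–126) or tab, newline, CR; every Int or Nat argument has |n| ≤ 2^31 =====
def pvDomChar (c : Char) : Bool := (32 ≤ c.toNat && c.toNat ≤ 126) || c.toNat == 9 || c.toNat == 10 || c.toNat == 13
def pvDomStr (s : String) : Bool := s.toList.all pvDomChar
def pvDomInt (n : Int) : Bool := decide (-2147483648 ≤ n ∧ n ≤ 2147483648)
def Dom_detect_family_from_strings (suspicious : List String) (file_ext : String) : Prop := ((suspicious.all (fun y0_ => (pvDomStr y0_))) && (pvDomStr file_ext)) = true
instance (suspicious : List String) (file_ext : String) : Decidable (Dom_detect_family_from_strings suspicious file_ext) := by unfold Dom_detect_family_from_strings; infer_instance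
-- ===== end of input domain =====

-- B replaces A's 25 per-keyword any() passes by ONE streaming scan over the strings that keeps a
-- shrinking work-list of (keyword, family) pairs — a keyword is retired at its first hit, bumping
-- its family's counter right then — followed by an enumerate-argmax; objective: alternative.

-- ===== PORT A =====
def pvKeysRansom : List String := ["base64", "encrypt", "payload", "ransom", "bitcoin"]
def pvKeysTrojan : List String := ["mimikatz", "metasploit", "meterpreter", "backdoor"]
def pvKeysBotnet : List String := ["nc -e", "wget", "curl", "botnet"]
def pvKeysSpy    : List String := ["keylog", "screenshot", "password", "credential"]
def pvKeysRoot   : List String := ["rootkit", "stealth", "hide", "hook"]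
def pvKeysWorm   : List String := ["/bin/sh", "spread", "replicate", "worm"]

-- sum(1 for k in keys if any(k in x for x in s))
def pvScore (keys : List String) (s : List String) : Int :=
  keys.foldl (fun acc k => if s.any (fun x => PySem.Str.isIn k x) then acc + 1 else acc) 0

def detect_family_from_strings (suspicious : List String) (file_ext : String) : String :=
  let s := suspicious.map PySem.Str.lower
  let scores : PySem.Dict String Int :=
    (((((PySem.Dict.empty.insert "Ransomware" (pvScore pvKeysRansom s)).insert
        "Trojan" (pvScore pvKeysTrojan s)).insert
        "Botnet" (pvScore pvKeysBotnet s)).insert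
        "Spyware" (pvScore pvKeysSpy s)).insert
        "Rootkit" (pvScore pvKeysRoot s)).insert
        "Worm" (pvScore pvKeysWorm s)
  let scores := if file_ext ∈ ([".exe", ".dll"] : List String) then
      PySem.Dict.modify scores "Trojan" 0 (fun v => v + 2) else scores
  let best := (PySem.List.max? scores.keys (fun k => scores.getD k 0)).getD ""
  let score := scores.getD best 0
  if score > 0 then best else "Trojan"

-- ===== PORT B =====
def pvKeywordFamily : List (String × Nat) :=
  [("base64", 0), ("encrypt", 0), ("payload", 0), ("ransom", 0), ("bitcoin", 0),
   ("mimikatz", 1), ("metasploit", 1), ("meterpreter", 1), ("backdoor", 1),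
   ("nc -e", 2), ("wget", 2), ("curl", 2), ("botnet", 2),
   ("keylog", 3), ("screenshot", 3), ("password", 3), ("credential", 3),
   ("rootkit", 4), ("stealth", 4), ("hide", 4), ("hook", 4),
   ("/bin/sh", 5), ("spread", 5), ("replicate", 5), ("worm", 5)]

def pvFamilyNames : List String :=
  ["Ransomware", "Trojan", "Botnet", "Spyware", "Rootkit", "Worm"]

-- counts[i] += d
def pvInc (cs : List Int) (i : Nat) (d : Int) : List Int := cs.set i (cs.getD i 0 + d)

-- one string of the streaming scan: test only the still-remaining keywords, retire the hits
def pvScanStep (st : List Int × List (String × Nat)) (x : String) : List Int × List (String × Nat) :=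
  if st.2.isEmpty then st
  else
    let lx := PySem.Str.lower x
    st.2.foldl (fun st2 p =>
      if PySem.Str.isIn p.1 lx then (pvInc st2.1 p.2 1, st2.2)
      else (st2.1, st2.2 ++ [p])) (st.1, [])

def detect_family_from_strings_alt (suspicious : List String) (file_ext : String) : String :=
  let st := suspicious.foldl pvScanStep (([0, 0, 0, 0, 0, 0] : List Int), pvKeywordFamily)
  let counts := if file_ext = ".exe" ∨ file_ext = ".dll" then pvInc st.1 1 2 else st.1
  let best := (PySem.List.enumerate counts 0).foldl
      (fun (b : Int × Int) p => if p.2 > b.2 then p else b) ((1 : Int), (0 : Int))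
  (PySem.List.pyGet? pvFamilyNames best.1).getD ""

-- ===== PRECONDITION & SPEC =====
def Spec_detect_family_from_strings (suspicious : List String) (file_ext : String) (out : String) : Prop := out = detect_family_from_strings_alt suspicious file_ext
instance (suspicious : List String) (file_ext : String) (out : String) : Decidable (Spec_detect_family_from_strings suspicious file_ext out) := by unfold Spec_detect_family_from_strings; infer_instance

-- ===== CLAIM (what is proved, stated in full; the proofs are below) =====
def Claim_equal_detect_family_from_strings : Prop := ∀ (suspicious : List String) (file_ext : String), Dom_detect_family_from_strings suspicious file_ext → Spec_detect_family_from_strings suspicious file_ext (detect_family_from_strings suspicious file_ext)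

-- ===== LEMMAS AND PROOFS =====

-- per-keyword detection predicate and per-family score both programs reduce to
def pvQ (susp : List String) (k : String) : Bool :=
  susp.any (fun x => PySem.Str.isIn k (PySem.Str.lower x))

def pvVal (susp : List String) (keys : List String) : Int :=
  ((keys.countP (pvQ susp) : Nat) : Int)

-- the common argmax fold
def pvStep (best : String × Int) (p : String × Int) : String × Int :=
  if p.2 > best.2 then p else best

def pvC (susp : List String) (bonus : Int) : String :=
  ([("Ransomware", pvVal susp ["base64", "encrypt", "payload", "ransom", "bitcoin"]),
    ("Trojan", pvVal susp ["mimikatz", "metasploit", "meterpreter", "backdoor"] + bonus),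
    ("Botnet", pvVal susp ["nc -e", "wget", "curl", "botnet"]),
    ("Spyware", pvVal susp ["keylog", "screenshot", "password", "credential"]),
    ("Rootkit", pvVal susp ["rootkit", "stealth", "hide", "hook"]),
    ("Worm", pvVal susp ["/bin/sh", "spread", "replicate", "worm"])].foldl pvStep ("Trojan", 0)).1

def pvArgmax (f : String → Int) (ks : List String) (m : String) : String :=
  ks.foldl (fun m k => if f m < f k then k else m) m

theorem pvArgmax_cons (f : String → Int) (k0 k : String) (ks : List String) :
    pvArgmax f (k :: ks) k0 = pvArgmax f ks (if f k0 < f k then k else k0) := by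
  unfold pvArgmax
  rw [List.foldl_cons]

theorem max?_cons (f : String → Int) (k0 : String) (ks : List String) :
    PySem.List.max? (k0 :: ks) f = some (pvArgmax f ks k0) := by
  induction ks generalizing k0 with
  | nil => rfl
  | cons k ks ih =>
    by_cases h : f k0 < f k
    · have h1 : PySem.List.max? (k0 :: k :: ks) f = PySem.List.max? (k :: ks) f := by
        show List.foldl _ (if f k0 < f k then some k else some k0) ks = List.foldl _ (some k) ks
        rw [if_pos h]
      rw [h1, ih k, pvArgmax_cons, if_pos h]
    · have h1 : PySem.List.max? (k0 :: k :: ks) f = PySem.List.max? (k0 :: ks) f := by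
        show List.foldl _ (if f k0 < f k then some k else some k0) ks = List.foldl _ (some k0) ks
        rw [if_neg h]
      rw [h1, ih k0, pvArgmax_cons, if_neg h]

theorem pvStep_eq (f : String → Int) (m k : String) :
    pvStep (if f m > 0 then (m, f m) else ("Trojan", 0)) (k, f k)
      = (if f (if f m < f k then k else m) > 0
         then ((if f m < f k then k else m), f (if f m < f k then k else m))
         else ("Trojan", 0)) := by
  unfold pvStep
  split_ifs <;> first | rfl | (exfalso; omega)

theorem auxB (f : String → Int) (ks : List String) (m : String) :
    ((ks.map fun k => (k, f k)).foldl pvStep (if f m > 0 then (m, f m) else ("Trojan", 0))).1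
      = if f (pvArgmax f ks m) > 0 then pvArgmax f ks m else "Trojan" := by
  induction ks generalizing m with
  | nil =>
    simp only [List.map_nil, List.foldl_nil, pvArgmax, List.foldl]
    split_ifs <;> rfl
  | cons k ks ih =>
    rw [List.map_cons, List.foldl_cons, pvStep_eq, pvArgmax_cons]
    exact ih (if f m < f k then k else m)

theorem selEq (f : String → Int) (k0 : String) (ks : List String) :
    (((k0 :: ks).map fun k => (k, f k)).foldl pvStep ("Trojan", 0)).1
      = (if ((0 : Int) < f ((PySem.List.max? (k0 :: ks) f).getD ""))
         then (PySem.List.max? (k0 :: ks) f).getD "" else "Trojan") := by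
  rw [max?_cons, Option.getD_some, List.map_cons, List.foldl_cons]
  have h0 : pvStep ("Trojan", 0) (k0, f k0) = if f k0 > 0 then (k0, f k0) else ("Trojan", 0) := rfl
  rw [h0, auxB]

theorem pvScore_eq (keys : List String) (susp : List String) :
    pvScore keys (susp.map PySem.Str.lower) = (keys.countP (pvQ susp) : Int) := by
  unfold pvScore
  rw [PySem.List.foldl_if_add_one, zero_add]
  exact congrArg _ (List.countP_congr (fun k _ => by simp [pvQ, List.any_map, Function.comp_def]))

theorem dict_norm (v1 v2 v3 v4 v5 v6 : Int) :
    (((((PySem.Dict.empty.insert "Ransomware" v1).insert "Trojan" v2).insert "Botnet" v3).insert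
        "Spyware" v4).insert "Rootkit" v5).insert "Worm" v6
      = PySem.Dict.mk [("Ransomware", v1), ("Trojan", v2), ("Botnet", v3), ("Spyware", v4), ("Rootkit", v5), ("Worm", v6)] := by
  simp [PySem.Dict.insert, PySem.Dict.contains, PySem.Dict.empty]

theorem modify_norm (v1 v2 v3 v4 v5 v6 : Int) :
    PySem.Dict.modify (PySem.Dict.mk [("Ransomware", v1), ("Trojan", v2), ("Botnet", v3), ("Spyware", v4), ("Rootkit", v5), ("Worm", v6)]) "Trojan" 0 (fun v => v + 2)
      = PySem.Dict.mk [("Ransomware", v1), ("Trojan", v2 + 2), ("Botnet", v3), ("Spyware", v4), ("Rootkit", v5), ("Worm", v6)] := by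
  simp [PySem.Dict.modify, PySem.Dict.getD, PySem.Dict.get?, PySem.Dict.insert, PySem.Dict.contains]

theorem gD1 (v1 v2 v3 v4 v5 v6 : Int) :
    PySem.Dict.getD (PySem.Dict.mk [("Ransomware", v1), ("Trojan", v2), ("Botnet", v3), ("Spyware", v4), ("Rootkit", v5), ("Worm", v6)]) "Ransomware" 0 = v1 := by
  simp [PySem.Dict.getD, PySem.Dict.get?]

theorem gD2 (v1 v2 v3 v4 v5 v6 : Int) :
    PySem.Dict.getD (PySem.Dict.mk [("Ransomware", v1), ("Trojan", v2), ("Botnet", v3), ("Spyware", v4), ("Rootkit", v5), ("Worm", v6)]) "Trojan" 0 = v2 := by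
  simp [PySem.Dict.getD, PySem.Dict.get?]

theorem gD3 (v1 v2 v3 v4 v5 v6 : Int) :
    PySem.Dict.getD (PySem.Dict.mk [("Ransomware", v1), ("Trojan", v2), ("Botnet", v3), ("Spyware", v4), ("Rootkit", v5), ("Worm", v6)]) "Botnet" 0 = v3 := by
  simp [PySem.Dict.getD, PySem.Dict.get?]

theorem gD4 (v1 v2 v3 v4 v5 v6 : Int) :
    PySem.Dict.getD (PySem.Dict.mk [("Ransomware", v1), ("Trojan", v2), ("Botnet", v3), ("Spyware", v4), ("Rootkit", v5), ("Worm", v6)]) "Spyware" 0 = v4 := by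
  simp [PySem.Dict.getD, PySem.Dict.get?]

theorem gD5 (v1 v2 v3 v4 v5 v6 : Int) :
    PySem.Dict.getD (PySem.Dict.mk [("Ransomware", v1), ("Trojan", v2), ("Botnet", v3), ("Spyware", v4), ("Rootkit", v5), ("Worm", v6)]) "Rootkit" 0 = v5 := by
  simp [PySem.Dict.getD, PySem.Dict.get?]

theorem gD6 (v1 v2 v3 v4 v5 v6 : Int) :
    PySem.Dict.getD (PySem.Dict.mk [("Ransomware", v1), ("Trojan", v2), ("Botnet", v3), ("Spyware", v4), ("Rootkit", v5), ("Worm", v6)]) "Worm" 0 = v6 := by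
  simp [PySem.Dict.getD, PySem.Dict.get?]

theorem A_sel (v1 v2 v3 v4 v5 v6 : Int) :
    (let scores := PySem.Dict.mk [("Ransomware", v1), ("Trojan", v2), ("Botnet", v3), ("Spyware", v4), ("Rootkit", v5), ("Worm", v6)]
     let best := (PySem.List.max? scores.keys (fun k => scores.getD k 0)).getD ""
     if scores.getD best 0 > 0 then best else "Trojan")
      = (([("Ransomware", v1), ("Trojan", v2), ("Botnet", v3), ("Spyware", v4), ("Rootkit", v5), ("Worm", v6)].foldl pvStep ("Trojan", 0)).1) := by
  have h := selEq (fun k => PySem.Dict.getD (PySem.Dict.mk [("Ransomware", v1), ("Trojan", v2), ("Botnet", v3), ("Spyware", v4), ("Rootkit", v5), ("Worm", v6)]) k 0)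
      "Ransomware" ["Trojan", "Botnet", "Spyware", "Rootkit", "Worm"]
  rw [show ([("Ransomware", v1), ("Trojan", v2), ("Botnet", v3), ("Spyware", v4), ("Rootkit", v5), ("Worm", v6)] : List (String × Int))
        = (["Ransomware", "Trojan", "Botnet", "Spyware", "Rootkit", "Worm"].map
            fun k => (k, PySem.Dict.getD (PySem.Dict.mk [("Ransomware", v1), ("Trojan", v2), ("Botnet", v3), ("Spyware", v4), ("Rootkit", v5), ("Worm", v6)]) k 0)) from by
      simp [gD1, gD2, gD3, gD4, gD5, gD6]]
  exact h.symm

theorem A_eq (susp : List String) (ext : String) :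
    detect_family_from_strings susp ext
      = pvC susp (if ext = ".exe" ∨ ext = ".dll" then 2 else 0) := by
  by_cases hc : ext = ".exe" ∨ ext = ".dll"
  · have hin : ext ∈ ([".exe", ".dll"] : List String) := by
      rcases hc with h | h <;> simp [h]
    rw [if_pos hc]
    simp only [detect_family_from_strings, pvKeysRansom, pvKeysTrojan, pvKeysBotnet,
      pvKeysSpy, pvKeysRoot, pvKeysWorm, if_pos hin, dict_norm, modify_norm, A_sel, pvScore_eq]
    simp only [pvC, pvVal, pvStep, List.foldl_cons, List.foldl_nil]
  · have hin : ¬ ext ∈ ([".exe", ".dll"] : List String) := by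
      simp only [List.mem_cons, List.not_mem_nil]
      tauto
    rw [if_neg hc]
    simp only [detect_family_from_strings, pvKeysRansom, pvKeysTrojan, pvKeysBotnet,
      pvKeysSpy, pvKeysRoot, pvKeysWorm, if_neg hin, dict_norm, A_sel, pvScore_eq]
    simp only [pvC, pvVal, pvStep, List.foldl_cons, List.foldl_nil, add_zero]

-- ===== B-side lemmas =====

-- abstract counting step over (keyword, family) pairs
def pvCStep (q : String × Nat → Bool) (c : List Int) (p : String × Nat) : List Int :=
  if q p then pvInc c p.2 1 else c

-- counts[f] += a; counts[f] += b  ==  counts[f] += (a+b)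
def pvAdd (cs : List Int) (f : Nat) (m : Int) : List Int := cs.set f (cs.getD f 0 + m)

theorem pv_getD_set_self (l : List Int) (i : Nat) (a : Int) (h : i < l.length) :
    (l.set i a).getD i 0 = a := by
  rw [List.getD_eq_getElem?_getD, List.getElem?_set_self (by simpa using h)]
  rfl

theorem pv_getD_set_ne (l : List Int) (i j : Nat) (a : Int) (h : i ≠ j) :
    (l.set j a).getD i 0 = l.getD i 0 := by
  rw [List.getD_eq_getElem?_getD, List.getElem?_set_ne (by omega), ← List.getD_eq_getElem?_getD]

theorem pvAdd_pvAdd (cs : List Int) (f : Nat) (a b : Int) :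
    pvAdd (pvAdd cs f a) f b = pvAdd cs f (a + b) := by
  unfold pvAdd
  by_cases h : f < cs.length
  · rw [pv_getD_set_self cs f _ h, List.set_set, add_assoc]
  · have hcs : ∀ v : Int, cs.set f v = cs := fun v => List.set_eq_of_length_le (by omega)
    rw [hcs, hcs, hcs]

theorem pvAdd_zero (cs : List Int) (f : Nat) : pvAdd cs f 0 = cs := by
  unfold pvAdd
  by_cases h : f < cs.length
  · have hg : cs.getD f 0 = cs[f] := by
      rw [List.getD_eq_getElem?_getD, List.getElem?_eq_getElem h]; rfl
    rw [add_zero, hg, List.set_getElem_self]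
  · rw [List.set_eq_of_length_le (by omega)]

theorem pvInc_comm (cs : List Int) (i j : Nat) (d e : Int) :
    pvInc (pvInc cs i d) j e = pvInc (pvInc cs j e) i d := by
  by_cases hij : i = j
  · subst hij
    show pvAdd (pvAdd cs i d) i e = pvAdd (pvAdd cs i e) i d
    rw [pvAdd_pvAdd, pvAdd_pvAdd, add_comm]
  · unfold pvInc
    rw [pv_getD_set_ne cs j i (cs.getD i 0 + d) (Ne.symm hij),
      pv_getD_set_ne cs i j (cs.getD j 0 + e) hij, List.set_comm _ _ hij]

theorem foldl_pvInc_comm (q : String × Nat → Bool) (rs : List (String × Nat))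
    (cs : List Int) (i : Nat) (d : Int) :
    rs.foldl (pvCStep q) (pvInc cs i d) = pvInc (rs.foldl (pvCStep q) cs) i d := by
  induction rs generalizing cs with
  | nil => rfl
  | cons p rs ih =>
    simp only [List.foldl_cons, pvCStep]
    by_cases h : q p
    · rw [if_pos h, if_pos h, pvInc_comm, ih]
    · rw [if_neg h, if_neg h, ih]

-- the inner fold of pvScanStep: counts get the hits, the keep-list gets the misses
theorem inner_char (lx : String) (rem : List (String × Nat)) (cs : List Int)
    (acc : List (String × Nat)) :
    rem.foldl (fun st2 p =>
        if PySem.Str.isIn p.1 lx then (pvInc st2.1 p.2 1, st2.2)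
        else (st2.1, st2.2 ++ [p])) (cs, acc)
      = (rem.foldl (pvCStep (fun p => PySem.Str.isIn p.1 lx)) cs,
         acc ++ rem.filter (fun p => !PySem.Str.isIn p.1 lx)) := by
  induction rem generalizing cs acc with
  | nil => simp
  | cons p rs ih =>
    simp only [List.foldl_cons, List.filter_cons]
    by_cases h : PySem.Str.isIn p.1 lx
    · rw [if_pos h, ih]
      have h' : PySem.Chars.isIn p.1.toList lx.toList = true := by simpa using h
      simp [pvCStep, h']
    · rw [if_neg h, ih]
      have h' : PySem.Chars.isIn p.1.toList lx.toList = false := by simpa using h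
      simp [pvCStep, h', List.append_assoc]

-- interleaving: first count all g-hits, then count q-hits among the g-misses
theorem interleave (g q : String × Nat → Bool) (rem : List (String × Nat)) (cs : List Int) :
    (rem.filter (fun p => !g p)).foldl (pvCStep q) (rem.foldl (pvCStep g) cs)
      = rem.foldl (pvCStep (fun p => g p || q p)) cs := by
  induction rem generalizing cs with
  | nil => rfl
  | cons p rs ih =>
    by_cases hg : g p
    · have h1 : List.filter (fun p => !g p) (p :: rs) = List.filter (fun p => !g p) rs := by
        simp [hg]
      have h2 : List.foldl (pvCStep g) cs (p :: rs) = List.foldl (pvCStep g) (pvInc cs p.2 1) rs := by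
        rw [List.foldl_cons]
        show List.foldl (pvCStep g) (if g p = true then _ else _) rs = _
        rw [if_pos hg]
      have h3 : List.foldl (pvCStep fun p => g p || q p) cs (p :: rs)
          = List.foldl (pvCStep fun p => g p || q p) (pvInc cs p.2 1) rs := by
        rw [List.foldl_cons]
        show List.foldl _ (if (g p || q p) = true then _ else _) rs = _
        rw [if_pos (by simp [hg])]
      rw [h1, h2, h3]
      exact ih (pvInc cs p.2 1)
    · have h1 : List.filter (fun p => !g p) (p :: rs) = p :: List.filter (fun p => !g p) rs := by
        simp [hg]
      have h2 : List.foldl (pvCStep g) cs (p :: rs) = List.foldl (pvCStep g) cs rs := by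
        rw [List.foldl_cons]
        show List.foldl (pvCStep g) (if g p = true then _ else _) rs = _
        rw [if_neg hg]
      have h3 : List.foldl (pvCStep fun p => g p || q p) cs (p :: rs)
          = List.foldl (pvCStep fun p => g p || q p) (pvCStep q cs p) rs := by
        rw [List.foldl_cons]
        show List.foldl _ (if (g p || q p) = true then _ else _) rs = _
        have : (g p || q p) = q p := by simp [hg]
        rw [this]
        rfl
      rw [h1, h2, h3, List.foldl_cons]
      by_cases hq : q p
      · have e1 : pvCStep q (List.foldl (pvCStep g) cs rs) p
            = pvInc (List.foldl (pvCStep g) cs rs) p.2 1 := by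
          unfold pvCStep; rw [if_pos hq]
        have e2 : pvCStep q cs p = pvInc cs p.2 1 := by
          unfold pvCStep; rw [if_pos hq]
        rw [e1, e2, ← foldl_pvInc_comm]
        exact ih (pvInc cs p.2 1)
      · have e1 : pvCStep q (List.foldl (pvCStep g) cs rs) p = List.foldl (pvCStep g) cs rs := by
          unfold pvCStep; rw [if_neg hq]
        have e2 : pvCStep q cs p = cs := by
          unfold pvCStep; rw [if_neg hq]
        rw [e1, e2]
        exact ih cs

-- main loop invariant of the streaming scan
theorem scan_char (susp : List String) : ∀ (rem : List (String × Nat)) (cs : List Int),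
    susp.foldl pvScanStep (cs, rem)
      = (rem.foldl (pvCStep (fun p => pvQ susp p.1)) cs,
         rem.filter (fun p => !pvQ susp p.1)) := by
  induction susp with
  | nil =>
    intro rem cs
    have hfold : ∀ (rs : List (String × Nat)) (c : List Int),
        rs.foldl (pvCStep (fun p => pvQ ([] : List String) p.1)) c = c := by
      intro rs
      induction rs with
      | nil => intro c; rfl
      | cons p t iht =>
        intro c
        rw [List.foldl_cons]
        show List.foldl _ (if pvQ [] p.1 = true then _ else _) t = _
        rw [if_neg (by simp [pvQ])]
        exact iht c
    rw [List.foldl_nil, hfold]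
    have : rem.filter (fun p => !pvQ ([] : List String) p.1) = rem :=
      List.filter_eq_self.mpr (fun p _ => by simp [pvQ])
    rw [this]
  | cons x xs ih =>
    intro rem cs
    have hq : ∀ p : String × Nat,
        pvQ (x :: xs) p.1 = (PySem.Str.isIn p.1 (PySem.Str.lower x) || pvQ xs p.1) := by
      intro p; simp [pvQ]
    by_cases hrem : rem = []
    · subst hrem
      simp only [List.foldl_cons, pvScanStep, List.isEmpty_nil, if_pos]
      rw [ih [] cs]
      simp
    · simp only [List.foldl_cons]
      rw [show pvScanStep (cs, rem) x
            = (rem.foldl (pvCStep (fun p => PySem.Str.isIn p.1 (PySem.Str.lower x))) cs,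
               rem.filter (fun p => !PySem.Str.isIn p.1 (PySem.Str.lower x))) from by
        simp only [pvScanStep, List.isEmpty_iff, hrem, ite_false]
        rw [inner_char]
        simp]
      rw [ih, interleave]
      refine congrArg₂ Prod.mk ?_ ?_
      · exact List.foldl_ext _ _ cs (fun c p _ => by simp only [pvCStep, hq])
      · rw [List.filter_filter]
        exact List.filter_congr (fun p _ => by simp [hq p, Bool.and_comm])

-- a block of pairs that all carry the same family index counts into that single slot
theorem block_fold (q : String × Nat → Bool) (f : Nat) :
    ∀ (rs : List (String × Nat)), (∀ p ∈ rs, p.2 = f) → ∀ (cs : List Int),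
    rs.foldl (pvCStep q) cs = pvAdd cs f ((rs.countP q : Nat) : Int) := by
  intro rs
  induction rs with
  | nil => intro _ cs; simp [pvAdd_zero]
  | cons p rs ih =>
    intro hmem cs
    have hpf : p.2 = f := hmem p (List.mem_cons_self ..)
    have hrs : ∀ p ∈ rs, p.2 = f := fun p hp => hmem p (List.mem_cons_of_mem _ hp)
    simp only [List.foldl_cons, pvCStep, List.countP_cons]
    by_cases hqp : q p
    · rw [if_pos hqp, ih hrs, hpf]
      show pvAdd (pvAdd cs f 1) f _ = _
      rw [pvAdd_pvAdd]
      simp [hqp]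
      ring_nf
    · rw [if_neg hqp, ih hrs]
      simp [hqp]

theorem add6 (m0 m1 m2 m3 m4 m5 : Int) :
    pvAdd (pvAdd (pvAdd (pvAdd (pvAdd (pvAdd ([0,0,0,0,0,0] : List Int) 0 m0) 1 m1) 2 m2) 3 m3) 4 m4) 5 m5
      = [m0, m1, m2, m3, m4, m5] := by
  simp [pvAdd]

-- the selection folds of the two programs coincide
theorem sel6 (w1 w2 w3 w4 w5 w6 : Int) :
    (PySem.List.pyGet? pvFamilyNames
        (((PySem.List.enumerate ([w1, w2, w3, w4, w5, w6] : List Int) 0).foldl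
          (fun (b : Int × Int) p => if p.2 > b.2 then p else b) ((1 : Int), (0 : Int))).1)).getD ""
      = (([("Ransomware", w1), ("Trojan", w2), ("Botnet", w3), ("Spyware", w4),
           ("Rootkit", w5), ("Worm", w6)].foldl pvStep ("Trojan", 0)).1) := by
  have he : PySem.List.enumerate ([w1, w2, w3, w4, w5, w6] : List Int) 0
      = [((0 : Int), w1), (1, w2), (2, w3), (3, w4), (4, w5), (5, w6)] := by
    simp [PySem.List.enumerate_cons]
  rw [he]
  simp only [List.foldl_cons, List.foldl_nil, pvStep, gt_iff_lt]
  split_ifs <;> rfl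

theorem counts_char (susp : List String) :
    (susp.foldl pvScanStep (([0, 0, 0, 0, 0, 0] : List Int), pvKeywordFamily)).1
      = [pvVal susp ["base64", "encrypt", "payload", "ransom", "bitcoin"],
         pvVal susp ["mimikatz", "metasploit", "meterpreter", "backdoor"],
         pvVal susp ["nc -e", "wget", "curl", "botnet"],
         pvVal susp ["keylog", "screenshot", "password", "credential"],
         pvVal susp ["rootkit", "stealth", "hide", "hook"],
         pvVal susp ["/bin/sh", "spread", "replicate", "worm"]] := by
  rw [scan_char]
  show pvKeywordFamily.foldl (pvCStep (fun p => pvQ susp p.1)) [0, 0, 0, 0, 0, 0] = _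
  have hsplit : pvKeywordFamily
      = ((((((["base64", "encrypt", "payload", "ransom", "bitcoin"].map (fun k => (k, (0 : Nat))))
        ++ (["mimikatz", "metasploit", "meterpreter", "backdoor"].map (fun k => (k, (1 : Nat)))))
        ++ (["nc -e", "wget", "curl", "botnet"].map (fun k => (k, (2 : Nat)))))
        ++ (["keylog", "screenshot", "password", "credential"].map (fun k => (k, (3 : Nat)))))
        ++ (["rootkit", "stealth", "hide", "hook"].map (fun k => (k, (4 : Nat)))))
        ++ (["/bin/sh", "spread", "replicate", "worm"].map (fun k => (k, (5 : Nat))))) := rfl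
  rw [hsplit, List.foldl_append, List.foldl_append, List.foldl_append, List.foldl_append,
    List.foldl_append]
  rw [block_fold _ 5 _ (by decide), block_fold _ 4 _ (by decide), block_fold _ 3 _ (by decide),
    block_fold _ 2 _ (by decide), block_fold _ 1 _ (by decide), block_fold _ 0 _ (by decide)]
  rw [add6]
  simp only [List.countP_map, pvVal]
  rfl

theorem inc6 (m0 m1 m2 m3 m4 m5 : Int) :
    pvInc [m0, m1, m2, m3, m4, m5] 1 2 = [m0, m1 + 2, m2, m3, m4, m5] := by
  simp [pvInc]

theorem B_eq (susp : List String) (ext : String) :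
    detect_family_from_strings_alt susp ext
      = pvC susp (if ext = ".exe" ∨ ext = ".dll" then 2 else 0) := by
  by_cases hc : ext = ".exe" ∨ ext = ".dll"
  · rw [if_pos hc]
    simp only [detect_family_from_strings_alt, if_pos hc, counts_char, inc6, sel6]
    simp only [pvC]
  · rw [if_neg hc]
    simp only [detect_family_from_strings_alt, if_neg hc, counts_char, sel6]
    simp only [pvC, add_zero]

-- ===== VERDICT (by name: the statement is the Claim_ definition above) =====
theorem detect_family_from_strings_spec : Claim_equal_detect_family_from_strings := by
  intro susp ext _
  show detect_family_from_strings susp ext = detect_family_from_strings_alt susp ext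
  rw [A_eq, B_eq]
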